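-- pv_equiv track=rewrite | github.com/GnChez/DAWjs | Activitat_RA3/activitats.py | add_counter
-- ===== SOURCE A (Python) =====
-- def add_counter(first_dic, second_dic):
--     new_dic = {}
--     for char in first_dic:
--         if char not in new_dic:
--             new_dic[char] = first_dic[char]
--         else:
--             new_dic[char] += first_dic[char]
--
--     for char in second_dic:
--         if char not in new_dic:
--             new_dic[char] = second_dic[char]
--         else:
--             new_dic[char] += second_dic[char]
--     return new_dic
-- ===== SOURCE B (Python) =====
-- def add_counter(first_dic, second_dic):
--     rest = dict(second_dic)
--     new_dic = {}
--     for k, v in first_dic.items():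
--         new_dic[k] = v + rest.pop(k, 0)
--     new_dic.update(rest)
--     return new_dic
-- ===== Notes on version B (the rewrite author's own statement) =====
-- stated objective: alternative
-- what changed: B destructively consumes a copy of second_dic: one pass over first_dic pops each matching entry out of the copy and writes v + popped value, then bulk-appends whatever entries survived, replacing A's two copy-then-increment passes with membership tests.
import Mathlib
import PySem

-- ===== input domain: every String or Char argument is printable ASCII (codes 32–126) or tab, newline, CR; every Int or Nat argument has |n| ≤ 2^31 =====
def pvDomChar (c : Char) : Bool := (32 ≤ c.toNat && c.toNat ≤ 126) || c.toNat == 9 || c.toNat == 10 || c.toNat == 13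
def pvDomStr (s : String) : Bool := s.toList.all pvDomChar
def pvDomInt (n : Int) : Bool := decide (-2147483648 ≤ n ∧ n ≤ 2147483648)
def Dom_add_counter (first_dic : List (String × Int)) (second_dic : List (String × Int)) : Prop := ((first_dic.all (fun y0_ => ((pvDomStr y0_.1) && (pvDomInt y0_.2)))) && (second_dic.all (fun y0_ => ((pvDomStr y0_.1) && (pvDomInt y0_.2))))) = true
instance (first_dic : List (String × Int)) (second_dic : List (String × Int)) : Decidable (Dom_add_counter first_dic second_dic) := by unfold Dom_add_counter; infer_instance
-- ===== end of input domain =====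

-- B consumes a copy of second_dic destructively (pop each key of first_dic out of it,
-- then bulk-append the survivors) instead of A's two accumulating membership-test passes (alternative).

-- ===== PORT A =====
-- one loop of A: insert if key absent, otherwise add the value in place
def pvLoopA (d : PySem.Dict String Int) (l : List (String × Int)) : PySem.Dict String Int :=
  l.foldl (fun d p => if d.contains p.1 then d.modify p.1 0 (· + p.2) else d.insert p.1 p.2) d

def add_counter (first_dic : List (String × Int)) (second_dic : List (String × Int)) : List (String × Int) :=
  (pvLoopA (pvLoopA PySem.Dict.empty first_dic) second_dic).items

-- ===== PORT B =====
-- rest = dict(second_dic); for k, v in first_dic: new_dic[k] = v + rest.pop(k, 0); new_dic.update(rest)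
def add_counter_alt (first_dic : List (String × Int)) (second_dic : List (String × Int)) : List (String × Int) :=
  let rest : PySem.Dict String Int := PySem.Dict.mk second_dic
  let pr := first_dic.foldl (fun (acc : PySem.Dict String Int × PySem.Dict String Int) p =>
      match acc.2.pop? p.1 with
      | some (v, r) => (acc.1.insert p.1 (p.2 + v), r)
      | none => (acc.1.insert p.1 (p.2 + 0), acc.2))
    ((PySem.Dict.empty : PySem.Dict String Int), rest)
  (pr.1.update pr.2.items).items

-- ===== PRECONDITION & SPEC =====
-- Pre_ only states the representation invariant of a Python dict argument (pairwise-distinct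
-- keys in each association list); it excludes no input the Python A can actually receive.
def Pre_add_counter (first_dic : List (String × Int)) (second_dic : List (String × Int)) : Prop :=
  (first_dic.map Prod.fst).Nodup ∧ (second_dic.map Prod.fst).Nodup
instance (first_dic : List (String × Int)) (second_dic : List (String × Int)) : Decidable (Pre_add_counter first_dic second_dic) := by unfold Pre_add_counter; infer_instance

def pvWitness_add_counter : (List (String × Int)) × (List (String × Int)) :=
  ([("a", 2), ("b", -1)], [("b", 5), ("c", 0)])

def Spec_add_counter (first_dic : List (String × Int)) (second_dic : List (String × Int)) (out : List (String × Int)) : Prop := out = add_counter_alt first_dic second_dic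
instance (first_dic : List (String × Int)) (second_dic : List (String × Int)) (out : List (String × Int)) : Decidable (Spec_add_counter first_dic second_dic out) := by unfold Spec_add_counter; infer_instance

-- ===== CLAIM (what is proved, stated in full; the proofs are below) =====
def Claim_equal_add_counter : Prop := ∀ (first_dic : List (String × Int)) (second_dic : List (String × Int)), Dom_add_counter first_dic second_dic → Pre_add_counter first_dic second_dic → Spec_add_counter first_dic second_dic (add_counter first_dic second_dic)

-- ===== LEMMAS AND PROOFS =====

-- ---- A side ----

-- keys produced by one A-loop
theorem pvLoopA_keys (l : List (String × Int)) (d : PySem.Dict String Int) :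
    (pvLoopA d l).keys = PySem.Set.update d.keys (l.map Prod.fst) := by
  induction l generalizing d with
  | nil => simp [pvLoopA, PySem.Set.update]
  | cons p t ih =>
    simp only [pvLoopA, List.foldl_cons] at ih ⊢
    by_cases h : d.contains p.1 = true
    · rw [if_pos h, ih, List.map_cons, PySem.Set.update_cons, PySem.Dict.keys_modify,
        PySem.Dict.keys_insert_of_contains _ _ h,
        PySem.Set.add_of_mem ((PySem.Dict.contains_iff_mem_keys d p.1).mp h)]
    · have h' : d.contains p.1 = false := by simpa using h
      rw [if_neg h, ih, List.map_cons, PySem.Set.update_cons,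
        PySem.Dict.keys_insert_of_not_contains d p.2 h',
        PySem.Set.add_of_not_mem (fun hm => by
          simp [(PySem.Dict.contains_iff_mem_keys d p.1).mpr hm] at h')]

theorem pvLoopA_nodup (l : List (String × Int)) (d : PySem.Dict String Int)
    (h : d.keys.Nodup) : (pvLoopA d l).keys.Nodup := by
  rw [pvLoopA_keys]; exact PySem.Set.nodup_update _ _ h

theorem pvLoopA_getD (l : List (String × Int)) (d : PySem.Dict String Int) (k : String) :
    (pvLoopA d l).getD k 0 = d.getD k 0 + ((l.filter (fun p => p.1 == k)).map Prod.snd).sum := by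
  induction l generalizing d with
  | nil => simp [pvLoopA]
  | cons p t ih =>
    simp only [pvLoopA, List.foldl_cons] at ih ⊢
    by_cases hc : d.contains p.1 = true
    · rw [if_pos hc, ih]
      by_cases hk : p.1 = k
      · subst hk
        rw [PySem.Dict.getD_modify_self]
        simp
        ring
      · rw [PySem.Dict.getD_modify_of_ne _ _ _ (fun h => hk h.symm)]
        simp [hk]
    · have hc' : d.contains p.1 = false := by simpa using hc
      rw [if_neg hc, ih]
      by_cases hk : p.1 = k
      · subst hk
        rw [PySem.Dict.getD_insert_self, PySem.Dict.getD_of_not_contains d _ hc']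
        simp
      · rw [PySem.Dict.getD_insert_of_ne _ _ _ (fun h => hk h.symm)]
        simp [hk]

-- with distinct keys the summed filter is just the dict lookup
theorem pvSum_filter_eq_getD (l : List (String × Int)) (k : String)
    (h : (l.map Prod.fst).Nodup) :
    ((l.filter (fun p => p.1 == k)).map Prod.snd).sum = (PySem.Dict.mk l).getD k 0 := by
  induction l with
  | nil => simp [PySem.Dict.getD_eq_get?_getD, PySem.Dict.get?]
  | cons p t ih =>
    obtain ⟨a, v⟩ := p
    simp only [List.map_cons, List.nodup_cons] at h
    by_cases hk : a = k
    · subst hk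
      have hnil : t.filter (fun q => q.1 == a) = [] := by
        apply List.filter_eq_nil_iff.mpr
        intro q hq hbe
        exact h.1 (by
          have hq1 : q.1 = a := by simpa using hbe
          rw [← hq1]; exact List.mem_map_of_mem hq)
      simp [hnil, PySem.Dict.getD_eq_get?_getD, PySem.Dict.get?_mk_cons]
    · have hbe : (a == k) = false := by simpa using hk
      have hstep : (PySem.Dict.mk ((a, v) :: t)).getD k 0 = (PySem.Dict.mk t).getD k 0 := by
        simp [PySem.Dict.getD_eq_get?_getD, PySem.Dict.get?_mk_cons, hbe]
      rw [hstep, ← ih h.2, List.filter_cons, hbe]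
      simp

-- ---- B side ----

-- find? is unaffected by filtering out a different key
theorem pvFind?Filter (l : List (String × Int)) (a k : String) (h : k ≠ a) :
    List.find? (fun q => q.1 == k) (l.filter (fun q => !(q.1 == a)))
      = List.find? (fun q => q.1 == k) l := by
  induction l with
  | nil => simp
  | cons x xs ih =>
    have hak : ¬ (a = k) := fun e => h (Eq.symm e)
    by_cases hx : x.1 = a
    · have hk : (x.1 == k) = false := by simp [hx]; exact hak
      simp [List.filter_cons, hx, List.find?_cons, hk, ih, hak]
    · by_cases hk : x.1 = k
      · simp [List.filter_cons, hx, List.find?_cons, hk, h, ih]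
      · simp [List.filter_cons, hx, List.find?_cons, hk, h, ih]

-- lookup after erasing a different key
theorem pvGetD_erase_ne (r : PySem.Dict String Int) (a k : String) (h : k ≠ a) :
    (PySem.Dict.mk (r.items.filter (fun q => !(q.1 == a)))).getD k 0 = r.getD k 0 := by
  simp [PySem.Dict.getD_eq_get?_getD, PySem.Dict.get?, pvFind?Filter r.items a k h]

-- one step of B's loop: pop(k, 0) = (lookup, erase)
theorem pvStepB (o r : PySem.Dict String Int) (p : String × Int) :
    (match r.pop? p.1 with
     | some (v, r') => (o.insert p.1 (p.2 + v), r')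
     | none => (o.insert p.1 (p.2 + 0), r)) =
    (o.insert p.1 (p.2 + r.getD p.1 0),
     PySem.Dict.mk (r.items.filter (fun q => !(q.1 == p.1)))) := by
  cases hf : List.find? (fun q => q.1 == p.1) r.items with
  | none =>
    have hall : ∀ q ∈ r.items, ¬((q.1 == p.1) = true) := by
      intro q hq; exact fun hb => (List.find?_eq_none.mp hf) q hq hb
    have hfil : r.items.filter (fun q => !(q.1 == p.1)) = r.items := by
      apply List.filter_eq_self.mpr
      intro q hq; simpa using hall q hq
    cases r with
    | mk items =>
      simp [PySem.Dict.pop?, PySem.Dict.get?, PySem.Dict.getD_eq_get?_getD, hf, hfil]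
  | some q =>
    simp [PySem.Dict.pop?, PySem.Dict.get?, PySem.Dict.getD_eq_get?_getD,
      PySem.Dict.erase, hf]

-- B's loop over first: builds the merged entries for first's keys and filters them out of rest
theorem pvFoldB (l : List (String × Int)) (o r : PySem.Dict String Int)
    (hnd : (l.map Prod.fst).Nodup) :
    l.foldl (fun (acc : PySem.Dict String Int × PySem.Dict String Int) p =>
        match acc.2.pop? p.1 with
        | some (v, r') => (acc.1.insert p.1 (p.2 + v), r')
        | none => (acc.1.insert p.1 (p.2 + 0), acc.2)) (o, r)
    = (l.foldl (fun o' p => o'.insert p.1 (p.2 + r.getD p.1 0)) o,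
       PySem.Dict.mk (r.items.filter (fun q => !((l.map Prod.fst).contains q.1)))) := by
  induction l generalizing o r with
  | nil =>
    cases r with
    | mk items => simp
  | cons p t ih =>
    simp only [List.map_cons, List.nodup_cons] at hnd
    simp only [List.foldl_cons]
    rw [pvStepB]
    rw [ih _ _ hnd.2]
    refine Prod.ext ?_ ?_
    · apply PySem.List.foldl_congr_mem
      intro o' q hq
      have : (PySem.Dict.mk (r.items.filter (fun z => !(z.1 == p.1)))).getD q.1 0
          = r.getD q.1 0 := by
        apply pvGetD_erase_ne
        intro he
        exact hnd.1 (he ▸ List.mem_map_of_mem hq)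
      simp [this]
    · show PySem.Dict.mk _ = PySem.Dict.mk _
      congr 1
      rw [List.filter_filter]
      apply List.filter_congr
      intro q hq
      simp [List.contains_cons, Bool.not_or, Bool.and_comm, eq_comm]

-- B's result as an explicit list
theorem pvAltItems (first second : List (String × Int))
    (hpre : Pre_add_counter first second) :
    add_counter_alt first second
      = (first.map (fun p => (p.1, p.2 + (PySem.Dict.mk second).getD p.1 0)))
        ++ second.filter (fun q => !((first.map Prod.fst).contains q.1)) := by
  simp only [add_counter_alt]
  rw [pvFoldB first PySem.Dict.empty (PySem.Dict.mk second) hpre.1]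
  simp only [PySem.Dict.update]
  have hfresh1 : ∀ p ∈ first, (PySem.Dict.empty : PySem.Dict String Int).contains p.1 = false := by
    intro p _; simp [PySem.Dict.contains_empty]
  have hout1 := PySem.Dict.items_foldl_insert_fresh first Prod.fst
      (fun p => p.2 + (PySem.Dict.mk second).getD p.1 0) PySem.Dict.empty hfresh1 hpre.1
  have hkeys1 : (first.foldl
      (fun (o' : PySem.Dict String Int) p => o'.insert p.1 (p.2 + (PySem.Dict.mk second).getD p.1 0))
      PySem.Dict.empty).keys = first.map Prod.fst := by
    rw [PySem.Dict.keys_foldl_insert_key]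
    simp [PySem.Dict.keys_empty, PySem.Set.update_nil_left,
      PySem.Set.ofList_eq_self_of_nodup _ hpre.1]
  have hfresh2 : ∀ q ∈ second.filter (fun q => !((first.map Prod.fst).contains q.1)),
      (first.foldl
        (fun (o' : PySem.Dict String Int) p => o'.insert p.1 (p.2 + (PySem.Dict.mk second).getD p.1 0))
        PySem.Dict.empty).contains q.1 = false := by
    intro q hq
    rw [PySem.Dict.contains_eq_decide_mem_keys, hkeys1]
    have := (List.mem_filter.mp hq).2
    simpa using this
  have hnd2' : ((second.filter (fun q => !((first.map Prod.fst).contains q.1))).map Prod.fst).Nodup :=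
    ((List.filter_sublist (l := second)
      (p := fun q => !((first.map Prod.fst).contains q.1))).map Prod.fst).nodup hpre.2
  rw [PySem.Dict.items_foldl_insert_fresh _ Prod.fst Prod.snd _ hfresh2 hnd2', hout1]
  simp [PySem.Dict.empty]

-- ===== VERDICT (by name: the statement is the Claim_ definition above) =====
theorem add_counter_spec : Claim_equal_add_counter := by
  intro first second _hdom hpre
  unfold Spec_add_counter
  set f : PySem.Dict String Int := PySem.Dict.mk first with hf
  set s : PySem.Dict String Int := PySem.Dict.mk second with hs
  set D := pvLoopA (pvLoopA PySem.Dict.empty first) second with hD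
  have hk1 : f.keys = first.map Prod.fst := by simp [hf, PySem.Dict.keys]
  have hk2 : s.keys = second.map Prod.fst := by simp [hs, PySem.Dict.keys]
  have hnd1 : f.keys.Nodup := by rw [hk1]; exact hpre.1
  have hnd2 : s.keys.Nodup := by rw [hk2]; exact hpre.2
  have hkeys : D.keys = f.keys ++ s.keys.filter (fun k => !(f.contains k)) := by
    rw [hD, pvLoopA_keys, pvLoopA_keys]
    simp only [PySem.Dict.keys_empty, PySem.Set.update_nil_left, ← hk1, ← hk2]
    rw [PySem.Set.ofList_eq_self_of_nodup _ hnd1, PySem.Set.update_eq_append_filter,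
      PySem.Set.ofList_eq_self_of_nodup _ hnd2]
    congr 1
    apply List.filter_congr
    intro k _
    simp [PySem.Set.contains_eq_listContains, PySem.Dict.contains_eq_decide_mem_keys]
  have hDnd : D.keys.Nodup := by
    rw [hD]
    exact pvLoopA_nodup _ _ (pvLoopA_nodup _ _ (by simp [PySem.Dict.keys_empty]))
  have hval : ∀ k, D.getD k 0 = f.getD k 0 + s.getD k 0 := by
    intro k
    rw [hD, pvLoopA_getD, pvLoopA_getD,
      pvSum_filter_eq_getD first k hpre.1, pvSum_filter_eq_getD second k hpre.2, ← hf, ← hs]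
    simp [PySem.Dict.getD_empty]
  show D.items = add_counter_alt first second
  rw [pvAltItems first second hpre, PySem.Dict.items_eq_map_keys D hDnd 0, hkeys,
    List.map_append]
  congr 1
  · rw [hk1, List.map_map]
    apply List.map_congr_left
    intro p hp
    have hmem : (p.1, p.2) ∈ f.items := by simpa [hf] using hp
    have hv : f.getD p.1 0 = p.2 := PySem.Dict.getD_of_mem_items f hmem hnd1 0
    simp [Function.comp, hval, hv, ← hs]
  · rw [hk2, List.filter_map, List.map_map]
    have hpred : ∀ q ∈ second,
        ((fun k => !(f.contains k)) ∘ Prod.fst) q = (!((first.map Prod.fst).contains q.1)) := by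
      intro q _
      simp [Function.comp, PySem.Dict.contains_eq_decide_mem_keys, hk1]
    rw [List.filter_congr hpred]
    have hid : ∀ q ∈ second.filter (fun q => !((first.map Prod.fst).contains q.1)),
        ((fun k => (k, D.getD k 0)) ∘ Prod.fst) q = id q := by
      intro q hq
      have hnc : f.contains q.1 = false := by
        have := (List.mem_filter.mp hq).2
        rw [PySem.Dict.contains_eq_decide_mem_keys, hk1]
        simpa using this
      have hv2 : s.getD q.1 0 = q.2 :=
        PySem.Dict.getD_of_mem_items s (by simpa [hs] using (List.mem_filter.mp hq).1) hnd2 0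
      simp [Function.comp, hval, PySem.Dict.getD_of_not_contains _ _ hnc, hv2]
    rw [List.map_congr_left hid, List.map_id]
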